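-- pv_equiv track=rewrite | github.com/mcjcode/number-theory | bps.py | bps_facts_w_rep
-- ===== SOURCE A (Python) =====
-- def bps_facts_w_rep(n, ps):
--     """
--     n: the integer upper bound
--     ps: the list of primes
--
--     yields: all factorized integers [(p1, e1), ..., (pk, ek)]
--         where p1**e1 * ... * pk**ek <= n and all pi are
--         from the list ps
--
--     Note: the implementation is iterative, and not recursive,
--     and so is suitable for cases where ps is large (i.e. cases
--     where the stack would normally grow to the size of ps)
--     """
--     num_primes = len(ps)
--     if n < 1:
--         return
--     yield []
--     if n==1 or num_primes==0:
--         return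
--
--     val = [[ps[-1], num_primes-1, 1, n//ps[-1]]]
--     while True:
--         yield [(v[0], v[2]) for v in val]
--         #
--         # find the largest prime that is
--         # 1) as large or larger than the
--         #    primes already in the factorization, and
--         # 2) less than what is left
--         #
--         pi = num_primes-1
--         p = ps[pi]
--         while p > val[-1][3]:
--             if p < val[-1][0]:
--                 break
--             pi -= 1
--             if pi < 0:
--                 break
--             p = ps[pi]
--
--         if pi < 0:
--             return
--
--         #
--         # if there is no such prime, we have to back
--         # track over the previous prime used.
--         #
--         if p < val[-1][0]:  # if there is not an add'l prime
--             pi = val[-1][1]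
--             p = ps[pi-1]
--             if len(val) == 1:
--                 val[-1] = [p, pi-1, 1, n//p]
--             else:
--                 del val[-1]
--                 if p == val[-1][0]:
--                     val[-1][2] += 1
--                     val[-1][3] //= p
--                 else:
--                     val.append([p, pi-1, 1, val[-1][3]//p])
--         elif p == val[-1][0]:  # we can divide by our prime again
--             val[-1][2] += 1
--             val[-1][3] //= p
--         else:
--             val.append([p, pi, 1, val[-1][3]//p])
-- ===== SOURCE B (Python) =====
-- def bps_facts_w_rep(n, ps):
--     """
--     Recursive DFS re-implementation: yields [] first, then explores
--     factorizations depth-first, trying candidate primes from the highest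
--     index down to the index of the last prime used (repeating the last
--     prime increments its exponent). Only primes p <= remaining are used,
--     so every yielded factorization has product <= n.
--     """
--     if n < 1:
--         return
--
--     def rec(fact, rem, lo):
--         yield fact
--         for j in range(len(ps) - 1, lo - 1, -1):
--             p = ps[j]
--             if p <= rem:
--                 if fact and j == lo:
--                     yield from rec(fact[:-1] + [(p, fact[-1][1] + 1)], rem // p, j)
--                 else:
--                     yield from rec(fact + [(p, 1)], rem // p, j)
--
--     yield from rec([], n, 0)
-- ===== Notes on version B (the rewrite author's own statement) =====
-- stated objective: alternative
-- what changed: Replaced A's iterative explicit-stack state machine (a while-True loop mutating a stack of [prime,index,exponent,remaining] records with a fused candidate/backtrack scan) by a recursive DFS generator that yields the current factorization and recurses over candidate prime indices from highest down to the last index used; B also checks p <= remaining before every branch, fixing A's unchecked root step.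
-- intended difference: When n >= 2 and ps contains a prime p > n, A also yields the spurious singleton [(p, 1)] whose product p exceeds n (its root/backtrack step installs a prime without the p <= remaining check), while B yields only factorizations with product <= n as the docstring promises. — e.g. on bps_facts_w_rep(2, [3]): A returns [[], [(3, 1)]], B returns [[]]
-- outside the precondition, e.g. on bps_facts_w_rep(3, [3, 2]): A returns [[], [(2, 1)]], B returns [[], [(2, 1)], [(3, 1)]]; on bps_facts_w_rep(2, [2, 2]): A returns [[], [(2, 1)]], B returns [[], [(2, 1)], [(2, 1)]]; on bps_facts_w_rep(1, [0]): A returns [[]], B raises ZeroDivisionError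
import Mathlib
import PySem

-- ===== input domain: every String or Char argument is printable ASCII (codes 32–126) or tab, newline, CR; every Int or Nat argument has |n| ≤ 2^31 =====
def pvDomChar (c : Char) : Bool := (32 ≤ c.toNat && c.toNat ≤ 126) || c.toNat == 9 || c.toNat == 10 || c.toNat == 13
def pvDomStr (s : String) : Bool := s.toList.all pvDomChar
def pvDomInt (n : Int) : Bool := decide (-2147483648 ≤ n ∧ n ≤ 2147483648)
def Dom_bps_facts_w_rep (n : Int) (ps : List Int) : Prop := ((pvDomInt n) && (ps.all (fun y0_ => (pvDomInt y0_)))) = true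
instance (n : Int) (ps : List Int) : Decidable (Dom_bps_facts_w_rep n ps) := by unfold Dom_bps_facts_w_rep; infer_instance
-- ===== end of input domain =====

-- B re-implements A's iterative explicit-stack enumeration as a recursive DFS; B checks
-- p ≤ remaining before every branch, so (intended difference, see D_) it does not emit
-- A's spurious singletons [(p,1)] with p > n.

-- ===== PORT A =====
-- A's stack `val` is kept head-first (head = Python's val[-1]); an entry is
-- (prime, index, exponent, remaining), exactly the four fields of Python's records.
def aFact (val : List (Int × Int × Int × Int)) : List (Int × Int) :=
  (val.reverse).map (fun v => (v.1, v.2.2.1))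

-- the fused candidate/backtrack scan (Python's inner `while p > val[-1][3]` loop),
-- descending from index k-1; returns the final (pi, p)
def aScan (ps : List Int) (rem lastp : Int) : Nat → Int × Int
  | 0 => (-1, 0)
  | k + 1 =>
    let p := ps.getD k 0
    if p > rem then
      if p < lastp then ((k : Int), p) else aScan ps rem lastp k
    else ((k : Int), p)

-- Python's `while True` loop; fuel is only a totality guard (one unit per iteration)
def aLoop (n : Int) (ps : List Int) : Nat → List (Int × Int × Int × Int) → List (List (Int × Int))
  | 0, _ => []
  | _ + 1, [] => []    -- unreachable: val is never empty
  | f + 1, (vp, vi, ve, vr) :: rest =>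
    let out := aFact ((vp, vi, ve, vr) :: rest)
    let s := aScan ps vr vp ps.length
    if s.1 < 0 then [out]
    else if s.2 < vp then
      -- backtrack over the previous prime used
      match rest with
      | [] =>
        let p := (PySem.List.pyGet? ps (vi - 1)).getD 0
        out :: aLoop n ps f [(p, vi - 1, 1, PySem.Int.floordiv n p)]
      | (qp, qi, qe, qr) :: rest' =>
        let p := (PySem.List.pyGet? ps (vi - 1)).getD 0
        if p = qp then
          out :: aLoop n ps f ((qp, qi, qe + 1, PySem.Int.floordiv qr p) :: rest')
        else
          out :: aLoop n ps f ((p, vi - 1, 1, PySem.Int.floordiv qr p) :: (qp, qi, qe, qr) :: rest')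
    else if s.2 = vp then
      out :: aLoop n ps f ((vp, vi, ve + 1, PySem.Int.floordiv vr s.2) :: rest)
    else
      out :: aLoop n ps f ((s.2, s.1, 1, PySem.Int.floordiv vr s.2) :: (vp, vi, ve, vr) :: rest)

def bps_facts_w_rep (n : Int) (ps : List Int) : List (List (Int × Int)) :=
  if n < 1 then []
  else
    [] :: (if n = 1 ∨ ps.length = 0 then []
      else
        let plast := (PySem.List.pyGet? ps (-1)).getD 0
        aLoop n ps ((n.toNat + 2) ^ (ps.length + 2))
          [(plast, (ps.length : Int) - 1, 1, PySem.Int.floordiv n plast)])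

-- ===== PORT B =====
-- recursive DFS (Python B's `rec`); fuel is only a totality guard (recursion depth)
def bRec (ps : List Int) : Nat → List (Int × Int) → Int → Nat → List (List (Int × Int))
  | 0, _, _, _ => []
  | f + 1, fact, rem, lo =>
    fact :: ((List.range' lo (ps.length - lo)).reverse).flatMap (fun j =>
      let p := ps.getD j 0
      if p ≤ rem then
        if fact ≠ [] ∧ j = lo then
          bRec ps f (fact.dropLast ++ [(p, (fact.getLastD (0, 0)).2 + 1)]) (PySem.Int.floordiv rem p) j
        else
          bRec ps f (fact ++ [(p, 1)]) (PySem.Int.floordiv rem p) j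
      else [])

def bps_facts_w_rep_alt (n : Int) (ps : List Int) : List (List (Int × Int)) :=
  if n < 1 then [] else bRec ps (n.toNat + 1) [] n 0

-- ===== PRECONDITION & SPEC =====
-- Pre_ restricts ps to the function's documented domain — a strictly increasing list of
-- integers ≥ 2 ("the list of primes"; empty ps, or n < 1 where ps is never touched, are
-- always fine).  Outside it A may diverge (1 or a negative in ps), raise
-- ZeroDivisionError (0 in ps), and on unsorted or duplicate lists A's value-based
-- backtracking scan silently skips factorizations while B enumerates by index, so both
-- outputs are accidental there (B can even raise where A returns, e.g. (1, [0])).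
def Pre_bps_facts_w_rep (n : Int) (ps : List Int) : Prop :=
  n < 1 ∨ ps = [] ∨ (List.IsChain (· < ·) ps ∧ ∀ p ∈ ps, 2 ≤ p)
instance (n : Int) (ps : List Int) : Decidable (Pre_bps_facts_w_rep n ps) := by
  unfold Pre_bps_facts_w_rep; infer_instance

def pvWitness_bps_facts_w_rep : Int × List Int := (6, [2, 3])

-- When n ≥ 2 and ps contains a prime p > n, A also yields the spurious singleton
-- [(p, 1)] whose product p exceeds n (its root/backtrack step installs a prime without
-- the p ≤ remaining check), while B yields only factorizations with product ≤ n as the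
-- docstring promises.
def D_bps_facts_w_rep (n : Int) (ps : List Int) : Prop :=
  2 ≤ n ∧ ∃ p ∈ ps, n < p
instance (n : Int) (ps : List Int) : Decidable (D_bps_facts_w_rep n ps) := by
  unfold D_bps_facts_w_rep; infer_instance

def Spec_bps_facts_w_rep (n : Int) (ps : List Int) (out : List (List (Int × Int))) : Prop :=
  ¬ D_bps_facts_w_rep n ps → out = bps_facts_w_rep_alt n ps
instance (n : Int) (ps : List Int) (out : List (List (Int × Int))) : Decidable (Spec_bps_facts_w_rep n ps out) := by
  unfold Spec_bps_facts_w_rep; infer_instance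

def pvDiffWitness_bps_facts_w_rep : Int × List Int := (2, [3])
def pvDiffWitnessOut_bps_facts_w_rep : (List (List (Int × Int))) × (List (List (Int × Int))) :=
  ([[], [(3, 1)]], [[]])

-- ===== CLAIM (what is proved, stated in full; the proofs are below) =====
def Claim_unchanged_bps_facts_w_rep : Prop := ∀ (n : Int) (ps : List Int), Dom_bps_facts_w_rep n ps → Pre_bps_facts_w_rep n ps → Spec_bps_facts_w_rep n ps (bps_facts_w_rep n ps)
def Claim_changed_bps_facts_w_rep : Prop := Dom_bps_facts_w_rep (pvDiffWitness_bps_facts_w_rep.1) (pvDiffWitness_bps_facts_w_rep.2) ∧ Pre_bps_facts_w_rep (pvDiffWitness_bps_facts_w_rep.1) (pvDiffWitness_bps_facts_w_rep.2) ∧ D_bps_facts_w_rep (pvDiffWitness_bps_facts_w_rep.1) (pvDiffWitness_bps_facts_w_rep.2) ∧ bps_facts_w_rep (pvDiffWitness_bps_facts_w_rep.1) (pvDiffWitness_bps_facts_w_rep.2) = pvDiffWitnessOut_bps_facts_w_rep.1 ∧ bps_facts_w_rep_alt (pvDiffWitness_bps_facts_w_rep.1) (pvDiffWitness_bps_facts_w_rep.2)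 = pvDiffWitnessOut_bps_facts_w_rep.2 ∧ pvDiffWitnessOut_bps_facts_w_rep.1 ≠ pvDiffWitnessOut_bps_facts_w_rep.2

def Claim_exact_bps_facts_w_rep : Prop := ∀ (n : Int) (ps : List Int), Dom_bps_facts_w_rep n ps → Pre_bps_facts_w_rep n ps → D_bps_facts_w_rep n ps → bps_facts_w_rep n ps ≠ bps_facts_w_rep_alt n ps

-- ===== LEMMAS AND PROOFS =====

-- the child explored from a node with factorization `fact`, remaining `rem`, lowest
-- admissible index `lo`, at candidate index `j` (the lambda inside bRec, with fuel f)
def bChild (ps : List Int) (f : Nat) (fact : List (Int × Int)) (rem : Int) (lo j : Nat) : List (List (Int × Int)) :=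
  if ps.getD j 0 ≤ rem then
    if fact ≠ [] ∧ j = lo then
      bRec ps f (fact.dropLast ++ [(ps.getD j 0, (fact.getLastD (0, 0)).2 + 1)]) (PySem.Int.floordiv rem (ps.getD j 0)) j
    else
      bRec ps f (fact ++ [(ps.getD j 0, 1)]) (PySem.Int.floordiv rem (ps.getD j 0)) j
  else []

theorem bRec_succ (ps : List Int) (f : Nat) (fact : List (Int × Int)) (rem : Int) (lo : Nat) :
    bRec ps (f + 1) fact rem lo
      = fact :: ((List.range' lo (ps.length - lo)).reverse).flatMap (bChild ps f fact rem lo) := rfl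

-- canonical fuel: any fuel > rem.toNat computes the same tree (see bRec_fuel_congr)
def TF (ps : List Int) (fact : List (Int × Int)) (rem : Int) (lo : Nat) : List (List (Int × Int)) :=
  bRec ps (rem.toNat + 1) fact rem lo


-- ---- generic helpers ----

theorem revRange_split (lo k J : Nat) (h1 : lo ≤ J) (h2 : J < lo + k) :
    (List.range' lo k).reverse
      = (List.range' (J + 1) (lo + k - (J + 1))).reverse ++ J :: (List.range' lo (J - lo)).reverse := by
  have e1 : List.range' lo (J - lo) ++ List.range' (lo + (J - lo)) (k - (J - lo)) = List.range' lo k := by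
    rw [List.range'_append_1]; congr 1; omega
  have e2 : lo + (J - lo) = J := by omega
  have e3 : k - (J - lo) = (lo + k - (J + 1)) + 1 := by omega
  rw [e2, e3] at e1
  rw [← e1, List.range'_succ, List.reverse_append, List.reverse_cons, List.append_assoc]
  simp

theorem flatMap_nil_of_forall {α β : Type} (l : List α) (f : α → List β)
    (h : ∀ x ∈ l, f x = []) : l.flatMap f = [] :=
  List.flatMap_eq_nil_iff.mpr h

-- ---- arithmetic facts about the division step ----

theorem step_bounds {rem p : Int} (hp : 2 ≤ p) (hpr : p ≤ rem) :
    1 ≤ PySem.Int.floordiv rem p ∧ PySem.Int.floordiv rem p < rem := by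
  have hp0 : (0 : Int) < p := by omega
  constructor
  · rw [PySem.Int.le_floordiv_iff_mul_le hp0]; omega
  · rw [PySem.Int.floordiv_lt_iff_lt_mul hp0]; nlinarith

-- ---- facts about ps under the precondition ----

theorem getD_mem_of_lt (ps : List Int) (i : Nat) (h : i < ps.length) : ps.getD i 0 ∈ ps := by
  rw [List.getD_eq_getElem ps 0 h]; exact List.getElem_mem h

theorem sorted_getD_lt (ps : List Int) (hs : List.IsChain (· < ·) ps) {i j : Nat}
    (hij : i < j) (hj : j < ps.length) : ps.getD i 0 < ps.getD j 0 := by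
  rw [List.getD_eq_getElem ps 0 (by omega), List.getD_eq_getElem ps 0 hj]
  exact List.pairwise_iff_getElem.mp hs.pairwise i j (by omega) hj hij

-- ---- fuel irrelevance for bRec ----

theorem bRec_fuel_congr (ps : List Int) (h2 : ∀ p ∈ ps, 2 ≤ p) :
    ∀ (f g : Nat) (fact : List (Int × Int)) (rem : Int) (lo : Nat),
      rem.toNat < f → rem.toNat < g → bRec ps f fact rem lo = bRec ps g fact rem lo := by
  intro f
  induction f using Nat.strong_induction_on with
  | _ f ih =>
    intro g fact rem lo hf hg
    match f, g with
    | f' + 1, g' + 1 =>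
      rw [bRec_succ, bRec_succ]
      congr 1
      apply List.flatMap_congr
      intro j hj
      have hjlt : j < ps.length := by
        have := List.mem_reverse.mp hj
        have := List.mem_range'.mp this
        omega
      show bChild ps f' fact rem lo j = bChild ps g' fact rem lo j
      unfold bChild
      by_cases hple : ps.getD j 0 ≤ rem
      · have hp2 : 2 ≤ ps.getD j 0 := h2 _ (getD_mem_of_lt ps j hjlt)
        have hb := step_bounds hp2 hple
        have hlt : (PySem.Int.floordiv rem (ps.getD j 0)).toNat < rem.toNat := by omega
        simp only [if_pos hple]
        split
        · exact ih f' (by omega) g' _ _ _ (by omega) (by omega)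
        · exact ih f' (by omega) g' _ _ _ (by omega) (by omega)
      · simp only [if_neg hple]

-- ---- counting: fuel sufficiency for the iterative loop ----

theorem geom_sum_le (R : Nat) (hR : 2 ≤ R) (c : Nat) :
    ∀ (k lo : Nat), lo + k ≤ c + 1 →
      1 + ((List.range' lo k).map (fun j => R ^ (c + 1 - j))).sum ≤ (R + 1) ^ (c + 1 - lo) := by
  intro k
  induction k with
  | zero => intro lo _; simpa using Nat.one_le_pow _ _ (by omega)
  | succ k ihk =>
    intro lo hlk
    rw [List.range'_succ, List.map_cons, List.sum_cons]
    have h1 := ihk (lo + 1) (by omega)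
    have hM : c + 1 - lo = (c + 1 - (lo + 1)) + 1 := by omega
    calc 1 + (R ^ (c + 1 - lo) + ((List.range' (lo + 1) k).map (fun j => R ^ (c + 1 - j))).sum)
        = R ^ (c + 1 - lo) + (1 + ((List.range' (lo + 1) k).map (fun j => R ^ (c + 1 - j))).sum) := by omega
      _ ≤ R ^ (c + 1 - lo) + (R + 1) ^ (c + 1 - (lo + 1)) := by omega
      _ ≤ (R + 1) ^ (c + 1 - lo) := by
          rw [hM, pow_succ, pow_succ]
          have : R ^ (c + 1 - (lo + 1)) * R ≤ (R + 1) ^ (c + 1 - (lo + 1)) * R :=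
            Nat.mul_le_mul_right _ (Nat.pow_le_pow_left (by omega) _)
          nlinarith [Nat.one_le_pow (c + 1 - (lo + 1)) (R + 1) (by omega)]

theorem length_bRec_le (ps : List Int) (h2 : ∀ p ∈ ps, 2 ≤ p) :
    ∀ (f : Nat) (fact : List (Int × Int)) (rem : Int) (lo : Nat),
      (bRec ps f fact rem lo).length ≤ (rem.toNat + 1) ^ (ps.length + 1 - lo) := by
  intro f
  induction f with
  | zero => intro fact rem lo; simp [bRec]
  | succ f ihf =>
    intro fact rem lo
    rw [bRec_succ]
    by_cases hlo : lo ≤ ps.length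
    case neg =>
      have : ps.length - lo = 0 := by omega
      simp only [this, List.range', List.reverse_nil, List.flatMap_nil, List.length_cons,
        List.length_nil]
      exact Nat.one_le_pow _ _ (by omega)
    case pos =>
    by_cases hrem : rem < 2
    · -- no feasible children
      have hnil : ((List.range' lo (ps.length - lo)).reverse).flatMap (bChild ps f fact rem lo) = [] := by
        apply flatMap_nil_of_forall
        intro j hj
        have hjlt : j < ps.length := by
          have := List.mem_range'.mp (List.mem_reverse.mp hj); omega
        have hp2 : 2 ≤ ps.getD j 0 := h2 _ (getD_mem_of_lt ps j hjlt)
        unfold bChild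
        simp only [if_neg (by omega : ¬ ps.getD j 0 ≤ rem)]
      rw [hnil]
      simpa using Nat.one_le_pow _ _ (by omega)
    · -- rem.toNat ≥ 2
      have hR : 2 ≤ rem.toNat := by omega
      rw [List.length_cons, List.length_flatMap]
      have hbound : ((List.range' lo (ps.length - lo)).reverse.map
            (fun j => (bChild ps f fact rem lo j).length)).sum
          ≤ ((List.range' lo (ps.length - lo)).reverse.map
            (fun j => rem.toNat ^ (ps.length + 1 - j))).sum := by
        apply List.sum_le_sum
        intro j hj
        have hjlt : j < ps.length := by
          have := List.mem_range'.mp (List.mem_reverse.mp hj); omega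
        have hp2 : 2 ≤ ps.getD j 0 := h2 _ (getD_mem_of_lt ps j hjlt)
        unfold bChild
        by_cases hple : ps.getD j 0 ≤ rem
        · have hb := step_bounds hp2 hple
          have hle : (PySem.Int.floordiv rem (ps.getD j 0)).toNat + 1 ≤ rem.toNat := by omega
          simp only [if_pos hple]
          have hpow : ((PySem.Int.floordiv rem (ps.getD j 0)).toNat + 1) ^ (ps.length + 1 - j)
              ≤ rem.toNat ^ (ps.length + 1 - j) := Nat.pow_le_pow_left hle _
          split
          · exact le_trans (ihf _ _ _) hpow
          · exact le_trans (ihf _ _ _) hpow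
        · simp only [if_neg hple, List.length_nil]; exact Nat.zero_le _
      have hgeo : 1 + ((List.range' lo (ps.length - lo)).map
            (fun j => rem.toNat ^ (ps.length + 1 - j))).sum
          ≤ (rem.toNat + 1) ^ (ps.length + 1 - lo) :=
        geom_sum_le rem.toNat hR ps.length (ps.length - lo) lo (by omega)
      simp only [List.map_reverse, List.sum_reverse_nat] at hbound ⊢
      omega


-- ---- the candidate/backtrack scan ----

theorem aScan_skip (ps : List Int) (rem lastp : Int) :
    ∀ (k1 k2 : Nat), k2 ≤ k1 →
      (∀ j, k2 ≤ j → j < k1 → rem < ps.getD j 0 ∧ lastp ≤ ps.getD j 0) →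
      aScan ps rem lastp k1 = aScan ps rem lastp k2 := by
  intro k1
  induction k1 with
  | zero => intro k2 h _; cases Nat.eq_zero_of_le_zero h; rfl
  | succ k ih =>
    intro k2 h hsk
    rcases Nat.eq_or_lt_of_le h with he | hlt
    · rw [he]
    · have hk := hsk k (by omega) (by omega)
      show (if ps.getD k 0 > rem then
              if ps.getD k 0 < lastp then ((k : Int), ps.getD k 0) else aScan ps rem lastp k
            else ((k : Int), ps.getD k 0)) = aScan ps rem lastp k2
      rw [if_pos (by omega : ps.getD k 0 > rem), if_neg (by omega : ¬ ps.getD k 0 < lastp)]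
      exact ih k2 (by omega) (fun j h1 h2 => hsk j h1 (by omega))

theorem aScan_hit (ps : List Int) (rem lastp : Int) (J : Nat) (h : ps.getD J 0 ≤ rem) :
    aScan ps rem lastp (J + 1) = ((J : Int), ps.getD J 0) := by
  show (if ps.getD J 0 > rem then
          if ps.getD J 0 < lastp then ((J : Int), ps.getD J 0) else aScan ps rem lastp J
        else ((J : Int), ps.getD J 0)) = ((J : Int), ps.getD J 0)
  rw [if_neg (by omega : ¬ ps.getD J 0 > rem)]

theorem aScan_back (ps : List Int) (rem lastp : Int) (k : Nat) (h : ps.getD k 0 < lastp) :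
    aScan ps rem lastp (k + 1) = ((k : Int), ps.getD k 0) := by
  show (if ps.getD k 0 > rem then
          if ps.getD k 0 < lastp then ((k : Int), ps.getD k 0) else aScan ps rem lastp k
        else ((k : Int), ps.getD k 0)) = ((k : Int), ps.getD k 0)
  by_cases hgt : ps.getD k 0 > rem
  · rw [if_pos hgt, if_pos h]
  · rw [if_neg hgt]

-- ---- the zipper: A's stack as a DFS position in B's tree ----

def pRem (n : Int) : List (Int × Int × Int × Int) → Int
  | [] => n
  | v :: _ => v.2.2.2

def pLo : List (Int × Int × Int × Int) → Nat
  | [] => 0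
  | v :: _ => (v.2.1).toNat

-- outputs still pending from the not-yet-explored siblings (indices i-1 … lo) at one level
def sibs (ps : List Int) (pref : List (Int × Int)) (rP : Int) (lo i : Nat) : List (List (Int × Int)) :=
  ((List.range' lo (i - lo)).reverse).flatMap (bChild ps rP.toNat pref rP lo)

def pending (n : Int) (ps : List Int) : List (Int × Int × Int × Int) → List (List (Int × Int))
  | [] => []
  | v :: rest => sibs ps (aFact rest) (pRem n rest) (pLo rest) (v.2.1).toNat ++ pending n ps rest

-- all outputs A still has to produce from stack S: the subtree of the current node,
-- then the pending siblings of every level of the stack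
def expectedOf (n : Int) (ps : List Int) (S : List (Int × Int × Int × Int)) : List (List (Int × Int)) :=
  match S with
  | [] => []
  | v :: rest => TF ps (aFact (v :: rest)) v.2.2.2 (v.2.1).toNat ++ pending n ps (v :: rest)

-- well-formed reachable stacks
def WF (n : Int) (ps : List Int) : List (Int × Int × Int × Int) → Prop
  | [] => False
  | (p, i, e, r) :: rest =>
      0 ≤ i ∧ i.toNat < ps.length ∧ p = ps.getD i.toNat 0 ∧ 1 ≤ e ∧ 1 ≤ r ∧
      p ≤ pRem n rest ∧
      (match rest with
       | [] => True
       | w :: _ => w.2.1 < i ∧ WF n ps rest)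

theorem aFact_cons (v : Int × Int × Int × Int) (S : List (Int × Int × Int × Int)) :
    aFact (v :: S) = aFact S ++ [(v.1, v.2.2.1)] := by
  simp [aFact]

theorem aFact_concat_ne (S : List (Int × Int × Int × Int)) (v : Int × Int × Int × Int) :
    aFact (v :: S) ≠ [] := by
  rw [aFact_cons]; simp


-- ---- subtree decompositions ----

theorem TF_unfold (ps : List Int) (fact : List (Int × Int)) (rem : Int) (lo : Nat) :
    TF ps fact rem lo
      = fact :: ((List.range' lo (ps.length - lo)).reverse).flatMap (bChild ps rem.toNat fact rem lo) :=
  bRec_succ ps rem.toNat fact rem lo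

theorem children_nil (ps : List Int) (F : Nat) (fact : List (Int × Int)) (rem : Int) (lo : Nat)
    (h : ∀ j, lo ≤ j → j < ps.length → rem < ps.getD j 0) :
    ((List.range' lo (ps.length - lo)).reverse).flatMap (bChild ps F fact rem lo) = [] := by
  apply flatMap_nil_of_forall
  intro j hj
  have hjr := List.mem_range'.mp (List.mem_reverse.mp hj)
  have := h j (by omega) (by omega)
  unfold bChild
  rw [if_neg (by omega)]

theorem children_split (ps : List Int) (F : Nat) (fact : List (Int × Int)) (rem : Int) (lo J : Nat)
    (hlo : lo ≤ J) (hJ : J < ps.length)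
    (hmax : ∀ j, J < j → j < ps.length → rem < ps.getD j 0) :
    ((List.range' lo (ps.length - lo)).reverse).flatMap (bChild ps F fact rem lo)
      = bChild ps F fact rem lo J
        ++ ((List.range' lo (J - lo)).reverse).flatMap (bChild ps F fact rem lo) := by
  rw [revRange_split lo (ps.length - lo) J hlo (by omega), List.flatMap_append, List.flatMap_cons]
  have hnil : ((List.range' (J + 1) (lo + (ps.length - lo) - (J + 1))).reverse).flatMap
      (bChild ps F fact rem lo) = [] := by
    apply flatMap_nil_of_forall
    intro j hj
    have hjr := List.mem_range'.mp (List.mem_reverse.mp hj)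
    have := hmax j (by omega) (by omega)
    unfold bChild
    rw [if_neg (by omega)]
  rw [hnil, List.nil_append]

-- ---- one loop iteration tracks the DFS ----

theorem loop_ok (n : Int) (ps : List Int)
    (hs : List.IsChain (· < ·) ps) (h2 : ∀ p ∈ ps, 2 ≤ p) (hq : ∀ p ∈ ps, p ≤ n) :
    ∀ (f : Nat) (S : List (Int × Int × Int × Int)), WF n ps S →
      (expectedOf n ps S).length ≤ f → aLoop n ps f S = expectedOf n ps S := by
  have hle : ∀ {i j : Nat}, i ≤ j → j < ps.length → ps.getD i 0 ≤ ps.getD j 0 := by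
    intro i j hij hj
    rcases Nat.eq_or_lt_of_le hij with he | hlt
    · rw [he]
    · exact le_of_lt (sorted_getD_lt ps hs hlt hj)
  intro f
  induction f with
  | zero =>
    intro S hWF hlen
    match S with
    | [] => exact absurd hWF (by simp [WF])
    | (vp, vi, ve, vr) :: rest =>
      exfalso
      have : expectedOf n ps ((vp, vi, ve, vr) :: rest)
          = TF ps (aFact ((vp, vi, ve, vr) :: rest)) vr vi.toNat ++ pending n ps ((vp, vi, ve, vr) :: rest) := rfl
      rw [this, TF_unfold] at hlen
      simp at hlen
  | succ f ih =>
    intro S hWF hlen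
    match S with
    | [] => exact absurd hWF (by simp [WF])
    | (vp, vi, ve, vr) :: rest =>
      obtain ⟨hvi0, hviN, hvp, hve, hvr, hprem, hrest⟩ := hWF
      have hvp2 : 2 ≤ vp := by rw [hvp]; exact h2 _ (getD_mem_of_lt ps _ hviN)
      by_cases hfeas : ∃ j, vi.toNat ≤ j ∧ j < ps.length ∧ ps.getD j 0 ≤ vr
      · -- a prime can still be used at this node
        obtain ⟨j0, hj0k, hj0N, hj0le⟩ := hfeas
        set P : Nat → Prop := fun j => ps.getD j 0 ≤ vr with hP
        have hPdec : DecidablePred P := fun j => by rw [hP]; infer_instance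
        set J := Nat.findGreatest P (ps.length - 1) with hJdef
        have hPJ : P J := Nat.findGreatest_spec (m := j0) (by omega) hj0le
        have hJN : J < ps.length := by
          have := Nat.findGreatest_le (P := P) (ps.length - 1); omega
        have hkJ : vi.toNat ≤ J := le_trans hj0k (Nat.le_findGreatest (by omega) hj0le)
        have hmax : ∀ j, J < j → j < ps.length → vr < ps.getD j 0 := by
          intro j hJj hjN
          have := Nat.findGreatest_is_greatest (P := P) hJj (by omega)
          rw [hP] at this; omega
        have hscan : aScan ps vr vp ps.length = ((J : Int), ps.getD J 0) := by
          rw [aScan_skip ps vr vp ps.length (J + 1) (by omega)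
            (by
              intro j h1 h2'
              refine ⟨hmax j (by omega) h2', ?_⟩
              rw [hvp]; exact hle (by omega) h2')]
          exact aScan_hit ps vr vp J hPJ
        rcases Nat.eq_or_lt_of_le hkJ with heJ | hltJ
        · -- repeat the current prime: exponent += 1
          have hpJ : ps.getD J 0 = vp := by rw [hvp, heJ]
          have hvple : vp ≤ vr := by rw [← hpJ]; exact hPJ
          have hb := step_bounds hvp2 hvple
          set S' : List (Int × Int × Int × Int) := (vp, vi, ve + 1, PySem.Int.floordiv vr vp) :: rest with hS'
          have hunf : aLoop n ps (f + 1) ((vp, vi, ve, vr) :: rest)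
              = aFact ((vp, vi, ve, vr) :: rest) :: aLoop n ps f S' := by
            simp only [aLoop, hscan, hpJ]
            rw [if_neg (by omega : ¬ ((J : Int) , vp).1 < 0),
              if_neg (by omega : ¬ ((J : Int), vp).2 < vp),
              if_true]
          have hstep : expectedOf n ps ((vp, vi, ve, vr) :: rest)
              = aFact ((vp, vi, ve, vr) :: rest) :: expectedOf n ps S' := by
            show TF ps (aFact ((vp, vi, ve, vr) :: rest)) vr vi.toNat
                ++ pending n ps ((vp, vi, ve, vr) :: rest)
              = aFact ((vp, vi, ve, vr) :: rest) :: expectedOf n ps S'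
            rw [TF_unfold,
              children_split ps vr.toNat (aFact ((vp, vi, ve, vr) :: rest)) vr vi.toNat J hkJ hJN hmax]
            have hch : bChild ps vr.toNat (aFact ((vp, vi, ve, vr) :: rest)) vr vi.toNat J
                = TF ps (aFact S') (PySem.Int.floordiv vr vp) vi.toNat := by
              unfold bChild
              rw [if_pos hPJ, if_pos ⟨aFact_concat_ne rest _, heJ.symm⟩]
              rw [aFact_cons]
              rw [List.dropLast_concat, List.getLastD_concat, hpJ, ← heJ]
              rw [hS', aFact_cons]
              exact bRec_fuel_congr ps h2 vr.toNat _ _ _ _ (by omega) (by omega)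
            rw [hch, ← heJ]
            simp only [List.range'_zero, Nat.sub_self, List.reverse_nil, List.flatMap_nil,
              List.append_nil]
            show _ = aFact ((vp, vi, ve, vr) :: rest)
              :: (TF ps (aFact S') (PySem.Int.floordiv vr vp) vi.toNat ++ pending n ps S')
            rw [List.cons_append]
            rfl
          have hWF' : WF n ps S' := ⟨hvi0, hviN, hvp, by omega, by omega, hprem, hrest⟩
          rw [hunf, hstep, ih S' hWF' (by rw [hstep] at hlen; simpa using hlen)]
        · -- append a larger prime
          have hpJgt : vp < ps.getD J 0 := by rw [hvp]; exact sorted_getD_lt ps hs hltJ hJN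
          have hpJ2 : 2 ≤ ps.getD J 0 := h2 _ (getD_mem_of_lt ps _ hJN)
          have hb := step_bounds hpJ2 hPJ
          set S' : List (Int × Int × Int × Int) :=
            (ps.getD J 0, (J : Int), 1, PySem.Int.floordiv vr (ps.getD J 0)) :: (vp, vi, ve, vr) :: rest with hS'
          have hunf : aLoop n ps (f + 1) ((vp, vi, ve, vr) :: rest)
              = aFact ((vp, vi, ve, vr) :: rest) :: aLoop n ps f S' := by
            simp only [aLoop, hscan]
            rw [if_neg (by omega : ¬ ((J : Int), ps.getD J 0).1 < 0),
              if_neg (by omega : ¬ ((J : Int), ps.getD J 0).2 < vp),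
              if_neg (by omega : ¬ ((J : Int), ps.getD J 0).2 = vp)]
          have hstep : expectedOf n ps ((vp, vi, ve, vr) :: rest)
              = aFact ((vp, vi, ve, vr) :: rest) :: expectedOf n ps S' := by
            show TF ps (aFact ((vp, vi, ve, vr) :: rest)) vr vi.toNat
                ++ pending n ps ((vp, vi, ve, vr) :: rest)
              = aFact ((vp, vi, ve, vr) :: rest) :: expectedOf n ps S'
            rw [TF_unfold,
              children_split ps vr.toNat (aFact ((vp, vi, ve, vr) :: rest)) vr vi.toNat J hkJ hJN hmax]
            have hch : bChild ps vr.toNat (aFact ((vp, vi, ve, vr) :: rest)) vr vi.toNat J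
                = TF ps (aFact S') (PySem.Int.floordiv vr (ps.getD J 0)) J := by
              unfold bChild
              rw [if_pos hPJ, if_neg (fun h => absurd h.2 (by omega))]
              rw [hS']
              simp only [aFact_cons]
              unfold TF
              apply bRec_fuel_congr ps h2
              · omega
              · omega
            rw [hch]
            have hexp : expectedOf n ps S'
                = TF ps (aFact S') (PySem.Int.floordiv vr (ps.getD J 0)) ((J : Int)).toNat
                  ++ (sibs ps (aFact ((vp, vi, ve, vr) :: rest)) vr vi.toNat J
                      ++ pending n ps ((vp, vi, ve, vr) :: rest)) := rfl
            rw [List.cons_append, hexp, Int.toNat_natCast, List.append_assoc]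
            rfl
          have hWFt : WF n ps ((vp, vi, ve, vr) :: rest) := ⟨hvi0, hviN, hvp, hve, hvr, hprem, hrest⟩
          have hWF' : WF n ps S' :=
            ⟨by omega, by simpa using hJN, by simp, by omega, by omega, hPJ,
             by show vi < (J : Int); omega, hWFt⟩
          rw [hunf, hstep, ih S' hWF' (by rw [hstep] at hlen; simpa using hlen)]
      · -- nothing fits any more: return or backtrack
        rw [not_exists] at hfeas
        have hfeas : ∀ j, vi.toNat ≤ j → j < ps.length → vr < ps.getD j 0 := by
          intro j h1 h2'
          have := hfeas j
          omega
        have hscan0 : aScan ps vr vp ps.length = aScan ps vr vp vi.toNat := by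
          apply aScan_skip ps vr vp ps.length vi.toNat (by omega)
          intro j h1 h2'
          exact ⟨hfeas j h1 h2', by rw [hvp]; exact hle (by omega) h2'⟩
        by_cases hk0 : vi.toNat = 0
        · -- at the first prime already: the loop (and hence the traversal) is finished
          have hrest0 : rest = [] := by
            match rest with
            | [] => rfl
            | w :: tail =>
              obtain ⟨hwlt, hWFr⟩ := hrest
              have : 0 ≤ w.2.1 := by
                match w, tail with
                | (a, b, c, d), tail => exact hWFr.1
              omega
          subst hrest0
          have hunf : aLoop n ps (f + 1) [(vp, vi, ve, vr)] = [aFact [(vp, vi, ve, vr)]] := by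
            simp only [aLoop, hscan0, hk0]
            rw [if_pos (by simp [aScan] : ((aScan ps vr vp 0).1 : Int) < 0)]
          have hnil := children_nil ps vr.toNat (aFact [(vp, vi, ve, vr)]) vr vi.toNat
            (fun j h1 h2' => hfeas j h1 h2')
          have hexp : expectedOf n ps [(vp, vi, ve, vr)] = [aFact [(vp, vi, ve, vr)]] := by
            show TF ps (aFact [(vp, vi, ve, vr)]) vr vi.toNat ++ pending n ps [(vp, vi, ve, vr)]
              = [aFact [(vp, vi, ve, vr)]]
            rw [TF_unfold, hnil]
            show _ ++ (sibs ps (aFact []) (pRem n []) (pLo []) vi.toNat ++ pending n ps []) = _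
            rw [hk0]
            simp [sibs, pending]
          rw [hunf, hexp]
        · -- step to the previous prime
          have htn : (vi - 1).toNat = vi.toNat - 1 := by omega
          have hk1N : vi.toNat - 1 < ps.length := by omega
          have hp'lt : ps.getD (vi.toNat - 1) 0 < vp := by
            rw [hvp]; exact sorted_getD_lt ps hs (by omega) hviN
          have hp'2 : 2 ≤ ps.getD (vi.toNat - 1) 0 := h2 _ (getD_mem_of_lt ps _ hk1N)
          have hscan1 : aScan ps vr vp ps.length
              = (((vi.toNat - 1 : Nat) : Int), ps.getD (vi.toNat - 1) 0) := by
            rw [hscan0, (by omega : vi.toNat = (vi.toNat - 1) + 1)]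
            exact aScan_back ps vr vp (vi.toNat - 1) hp'lt
          have hpy : (PySem.List.pyGet? ps (vi - 1)).getD 0 = ps.getD (vi.toNat - 1) 0 := by
            rw [(by omega : vi - 1 = ((vi.toNat - 1 : Nat) : Int)), PySem.List.pyGet?_natCast,
              List.getElem?_eq_getElem hk1N, List.getD_eq_getElem ps 0 hk1N]
            rfl
          match rest with
          | [] =>
            have hfn : ps.getD (vi.toNat - 1) 0 ≤ n := hq _ (getD_mem_of_lt ps _ hk1N)
            have hb := step_bounds hp'2 hfn
            set S' : List (Int × Int × Int × Int) :=
              [(ps.getD (vi.toNat - 1) 0, vi - 1, 1, PySem.Int.floordiv n (ps.getD (vi.toNat - 1) 0))] with hS'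
            have hunf : aLoop n ps (f + 1) [(vp, vi, ve, vr)]
                = aFact [(vp, vi, ve, vr)] :: aLoop n ps f S' := by
              simp only [aLoop, hscan1, hpy]
              rw [if_neg (by omega : ¬ (((vi.toNat - 1 : Nat) : Int), ps.getD (vi.toNat - 1) 0).1 < 0),
                if_pos (by omega : (((vi.toNat - 1 : Nat) : Int), ps.getD (vi.toNat - 1) 0).2 < vp)]
            have hstep : expectedOf n ps [(vp, vi, ve, vr)]
                = aFact [(vp, vi, ve, vr)] :: expectedOf n ps S' := by
              show TF ps (aFact [(vp, vi, ve, vr)]) vr vi.toNat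
                  ++ (sibs ps (aFact []) (pRem n []) (pLo []) vi.toNat ++ pending n ps [])
                = aFact [(vp, vi, ve, vr)] :: expectedOf n ps S'
              rw [TF_unfold, children_nil ps vr.toNat _ vr vi.toNat (fun j h1 h2' => hfeas j h1 h2')]
              have hsib : sibs ps (aFact []) (pRem n []) (pLo []) vi.toNat
                  = bChild ps n.toNat [] n 0 (vi.toNat - 1)
                    ++ sibs ps (aFact []) (pRem n []) (pLo []) (vi.toNat - 1) := by
                show ((List.range' 0 (vi.toNat - 0)).reverse).flatMap (bChild ps n.toNat [] n 0) = _
                rw [revRange_split 0 (vi.toNat - 0) (vi.toNat - 1) (by omega) (by omega),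
                  List.flatMap_append, List.flatMap_cons,
                  (by omega : 0 + (vi.toNat - 0) - (vi.toNat - 1 + 1) = 0)]
                simp [sibs, pRem, pLo, aFact]
              have hch : bChild ps n.toNat [] n 0 (vi.toNat - 1)
                  = TF ps (aFact S') (PySem.Int.floordiv n (ps.getD (vi.toNat - 1) 0)) (vi.toNat - 1) := by
                unfold bChild
                rw [if_pos hfn, if_neg (fun h => absurd h.1 (by simp))]
                rw [hS']
                show bRec ps n.toNat ([] ++ [(ps.getD (vi.toNat - 1) 0, 1)]) _ _ = _
                rw [List.nil_append]
                have : aFact S' = [(ps.getD (vi.toNat - 1) 0, 1)] := by rw [hS']; simp [aFact]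
                rw [this]
                unfold TF
                apply bRec_fuel_congr ps h2
                · omega
                · omega
              have hexp : expectedOf n ps S'
                  = TF ps (aFact S') (PySem.Int.floordiv n (ps.getD (vi.toNat - 1) 0)) (vi - 1).toNat
                    ++ (sibs ps (aFact []) (pRem n []) (pLo []) (vi - 1).toNat ++ pending n ps []) := rfl
              rw [hsib, hch, hexp, htn]
              simp [List.append_assoc]
            have hWF' : WF n ps S' :=
              ⟨by omega, by rw [htn]; exact hk1N, by rw [htn], le_refl 1, hb.1,
               hfn, trivial⟩
            rw [hunf, hstep, ih S' hWF' (by rw [hstep] at hlen; simpa using hlen)]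
          | (qp, qi, qe, qr) :: rest' =>
            obtain ⟨hqlt, hWFr⟩ := hrest
            obtain ⟨hqi0, hqiN, hqp, hqe, hqr1, hqprem, hqtail⟩ := hWFr
            have hWFr' : WF n ps ((qp, qi, qe, qr) :: rest') :=
              ⟨hqi0, hqiN, hqp, hqe, hqr1, hqprem, hqtail⟩
            have hqlt' : qi < vi := hqlt
            have hpremq : vp ≤ qr := hprem
            have hqk : qi.toNat ≤ vi.toNat - 1 := by omega
            by_cases hqeq : qi.toNat = vi.toNat - 1
            · -- the previous prime is the one below: increment its exponent
              have hp'q : ps.getD (vi.toNat - 1) 0 = qp := by rw [hqp, hqeq]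
              have hqp2 : 2 ≤ qp := by omega
              have hqple : qp ≤ qr := by omega
              have hb := step_bounds hqp2 hqple
              set S' : List (Int × Int × Int × Int) :=
                (qp, qi, qe + 1, PySem.Int.floordiv qr qp) :: rest' with hS'
              have hunf : aLoop n ps (f + 1) ((vp, vi, ve, vr) :: (qp, qi, qe, qr) :: rest')
                  = aFact ((vp, vi, ve, vr) :: (qp, qi, qe, qr) :: rest') :: aLoop n ps f S' := by
                simp only [aLoop, hscan1, hpy]
                rw [if_neg (by omega : ¬ (((vi.toNat - 1 : Nat) : Int), ps.getD (vi.toNat - 1) 0).1 < 0),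
                  if_pos (by omega : (((vi.toNat - 1 : Nat) : Int), ps.getD (vi.toNat - 1) 0).2 < vp),
                  if_pos hp'q, hp'q]
              have hstep : expectedOf n ps ((vp, vi, ve, vr) :: (qp, qi, qe, qr) :: rest')
                  = aFact ((vp, vi, ve, vr) :: (qp, qi, qe, qr) :: rest') :: expectedOf n ps S' := by
                show TF ps (aFact ((vp, vi, ve, vr) :: (qp, qi, qe, qr) :: rest')) vr vi.toNat
                    ++ (sibs ps (aFact ((qp, qi, qe, qr) :: rest')) qr qi.toNat vi.toNat
                        ++ pending n ps ((qp, qi, qe, qr) :: rest'))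
                  = _ :: expectedOf n ps S'
                rw [TF_unfold, children_nil ps vr.toNat _ vr vi.toNat (fun j h1 h2' => hfeas j h1 h2')]
                have hsib : sibs ps (aFact ((qp, qi, qe, qr) :: rest')) qr qi.toNat vi.toNat
                    = bChild ps qr.toNat (aFact ((qp, qi, qe, qr) :: rest')) qr qi.toNat qi.toNat := by
                  show ((List.range' qi.toNat (vi.toNat - qi.toNat)).reverse).flatMap _ = _
                  rw [(by omega : vi.toNat - qi.toNat = 1), List.range'_one]
                  simp
                have hch : bChild ps qr.toNat (aFact ((qp, qi, qe, qr) :: rest')) qr qi.toNat qi.toNat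
                    = TF ps (aFact S') (PySem.Int.floordiv qr qp) qi.toNat := by
                  unfold bChild
                  rw [if_pos (by rw [← hqp]; exact hqple : ps.getD qi.toNat 0 ≤ qr),
                    if_pos ⟨aFact_concat_ne rest' _, rfl⟩]
                  rw [hS']
                  simp only [aFact_cons, List.dropLast_concat, List.getLastD_concat, ← hqp]
                  unfold TF
                  apply bRec_fuel_congr ps h2
                  · omega
                  · omega
                rw [hsib, hch]
                show _ = _ :: (TF ps (aFact S') (PySem.Int.floordiv qr qp) qi.toNat
                  ++ (sibs ps (aFact rest') (pRem n rest') (pLo rest') qi.toNat ++ pending n ps rest'))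
                rw [List.cons_append]
                rfl
              have hWF' : WF n ps S' := ⟨hqi0, hqiN, hqp, by omega, by omega, hqprem, hqtail⟩
              rw [hunf, hstep, ih S' hWF' (by rw [hstep] at hlen; simpa using hlen)]
            · -- move to the next pending sibling index vi.toNat - 1
              have hqplt : qp < ps.getD (vi.toNat - 1) 0 := by
                rw [hqp]; exact sorted_getD_lt ps hs (by omega) hk1N
              have hp'qr : ps.getD (vi.toNat - 1) 0 ≤ qr := by omega
              have hb := step_bounds hp'2 hp'qr
              set S' : List (Int × Int × Int × Int) :=
                (ps.getD (vi.toNat - 1) 0, vi - 1, 1, PySem.Int.floordiv qr (ps.getD (vi.toNat - 1) 0))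
                  :: (qp, qi, qe, qr) :: rest' with hS'
              have hunf : aLoop n ps (f + 1) ((vp, vi, ve, vr) :: (qp, qi, qe, qr) :: rest')
                  = aFact ((vp, vi, ve, vr) :: (qp, qi, qe, qr) :: rest') :: aLoop n ps f S' := by
                simp only [aLoop, hscan1, hpy]
                rw [if_neg (by omega : ¬ (((vi.toNat - 1 : Nat) : Int), ps.getD (vi.toNat - 1) 0).1 < 0),
                  if_pos (by omega : (((vi.toNat - 1 : Nat) : Int), ps.getD (vi.toNat - 1) 0).2 < vp),
                  if_neg (by omega : ¬ ps.getD (vi.toNat - 1) 0 = qp)]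
              have hstep : expectedOf n ps ((vp, vi, ve, vr) :: (qp, qi, qe, qr) :: rest')
                  = aFact ((vp, vi, ve, vr) :: (qp, qi, qe, qr) :: rest') :: expectedOf n ps S' := by
                show TF ps (aFact ((vp, vi, ve, vr) :: (qp, qi, qe, qr) :: rest')) vr vi.toNat
                    ++ (sibs ps (aFact ((qp, qi, qe, qr) :: rest')) qr qi.toNat vi.toNat
                        ++ pending n ps ((qp, qi, qe, qr) :: rest'))
                  = _ :: expectedOf n ps S'
                rw [TF_unfold, children_nil ps vr.toNat _ vr vi.toNat (fun j h1 h2' => hfeas j h1 h2')]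
                have hsib : sibs ps (aFact ((qp, qi, qe, qr) :: rest')) qr qi.toNat vi.toNat
                    = bChild ps qr.toNat (aFact ((qp, qi, qe, qr) :: rest')) qr qi.toNat (vi.toNat - 1)
                      ++ sibs ps (aFact ((qp, qi, qe, qr) :: rest')) qr qi.toNat (vi.toNat - 1) := by
                  show ((List.range' qi.toNat (vi.toNat - qi.toNat)).reverse).flatMap _ = _
                  rw [revRange_split qi.toNat (vi.toNat - qi.toNat) (vi.toNat - 1) (by omega) (by omega),
                    List.flatMap_append, List.flatMap_cons,
                    (by omega : qi.toNat + (vi.toNat - qi.toNat) - (vi.toNat - 1 + 1) = 0)]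
                  simp [sibs]
                have hch : bChild ps qr.toNat (aFact ((qp, qi, qe, qr) :: rest')) qr qi.toNat (vi.toNat - 1)
                    = TF ps (aFact S') (PySem.Int.floordiv qr (ps.getD (vi.toNat - 1) 0)) (vi.toNat - 1) := by
                  unfold bChild
                  rw [if_pos hp'qr, if_neg (fun h => absurd h.2 (by omega))]
                  rw [hS']
                  simp only [aFact_cons]
                  unfold TF
                  apply bRec_fuel_congr ps h2
                  · omega
                  · omega
                rw [hsib, hch]
                have hexp : expectedOf n ps S'
                    = TF ps (aFact S') (PySem.Int.floordiv qr (ps.getD (vi.toNat - 1) 0)) (vi - 1).toNat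
                      ++ (sibs ps (aFact ((qp, qi, qe, qr) :: rest')) qr qi.toNat (vi - 1).toNat
                          ++ pending n ps ((qp, qi, qe, qr) :: rest')) := rfl
                rw [hexp, htn]
                simp [List.append_assoc]
              have hWF' : WF n ps S' :=
                ⟨by omega, by rw [htn]; exact hk1N, by rw [htn], le_refl 1, hb.1, hp'qr,
                 by show qi < vi - 1; omega, hWFr'⟩
              rw [hunf, hstep, ih S' hWF' (by rw [hstep] at hlen; simpa using hlen)]

-- ---- tightness: inside D_, A's spurious singleton makes the outputs differ ----

theorem aLoop_head (n : Int) (ps : List Int) (f : Nat) (v : Int × Int × Int × Int)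
    (rest : List (Int × Int × Int × Int)) :
    (aLoop n ps (f + 1) (v :: rest)).head? = some (aFact (v :: rest)) := by
  obtain ⟨vp, vi, ve, vr⟩ := v
  cases rest with
  | nil =>
    simp only [aLoop]
    split
    · rfl
    · split
      · rfl
      · split <;> rfl
  | cons q r =>
    obtain ⟨qp, qi, qe, qr⟩ := q
    simp only [aLoop]
    split
    · rfl
    · split
      · split <;> rfl
      · split <;> rfl

theorem bRec_head_fst (ps : List Int) :
    ∀ (f : Nat) (p0 e0 : Int) (t0 : List (Int × Int)) (rem : Int) (lo : Nat),
      (t0 = [] → p0 = ps.getD lo 0) →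
      ∀ x ∈ bRec ps f ((p0, e0) :: t0) rem lo, ∃ e t, x = (p0, e) :: t := by
  intro f
  induction f with
  | zero => intro p0 e0 t0 rem lo _ x hx; simp [bRec] at hx
  | succ f ihf =>
    intro p0 e0 t0 rem lo hlink x hx
    rw [bRec_succ] at hx
    rcases List.mem_cons.mp hx with hx | hx
    · exact ⟨e0, t0, hx⟩
    · obtain ⟨j, _, hxj⟩ := List.mem_flatMap.mp hx
      unfold bChild at hxj
      by_cases hfe : ps.getD j 0 ≤ rem
      · rw [if_pos hfe] at hxj
        by_cases hml : (p0, e0) :: t0 ≠ [] ∧ j = lo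
        · rw [if_pos hml] at hxj
          cases t0 with
          | nil =>
            have hp0 : p0 = ps.getD lo 0 := hlink rfl
            have h' : ([(p0, e0)].dropLast ++ [(ps.getD j 0, ([(p0, e0)].getLastD (0, 0)).2 + 1)])
                = [(ps.getD j 0, e0 + 1)] := by simp
            rw [h'] at hxj
            obtain ⟨e, t, hx⟩ := ihf (ps.getD j 0) (e0 + 1) [] _ j (fun _ => rfl) x hxj
            exact ⟨e, t, by rw [hx, hml.2, ← hp0]⟩
          | cons y t1 =>
            have hdl : ((p0, e0) :: y :: t1).dropLast ++ [(ps.getD j 0, ((y :: t1).getLastD (0, 0)).2 + 1)]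
                = (p0, e0) :: ((y :: t1).dropLast ++ [(ps.getD j 0, ((y :: t1).getLastD (0, 0)).2 + 1)]) := by
              simp
            rw [show ((p0, e0) :: y :: t1).getLastD (0, 0) = (y :: t1).getLastD (0, 0) by simp,
              hdl] at hxj
            exact ihf p0 e0 _ _ _ (by simp) x hxj
        · rw [if_neg hml, List.cons_append] at hxj
          exact ihf p0 e0 (t0 ++ [(ps.getD j 0, 1)]) _ _ (by simp) x hxj
      · rw [if_neg hfe] at hxj
        simp at hxj


-- ===== VERDICT =====
theorem bps_facts_w_rep_spec : Claim_unchanged_bps_facts_w_rep := by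
  intro n ps _ hpre
  unfold Spec_bps_facts_w_rep
  intro hnd
  by_cases hn1 : n < 1
  · unfold bps_facts_w_rep bps_facts_w_rep_alt
    rw [if_pos hn1, if_pos hn1]
  · have halt : bps_facts_w_rep_alt n ps = bRec ps (n.toNat + 1) [] n 0 := by
      unfold bps_facts_w_rep_alt; rw [if_neg hn1]
    rcases hpre with hpre | hpre | ⟨hs, h2⟩
    · omega
    · -- ps = []
      subst hpre
      unfold bps_facts_w_rep
      rw [if_neg hn1, halt, bRec_succ]
      simp
    · -- sorted list of integers ≥ 2
      by_cases hn2 : n = 1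
      · -- n = 1: no prime fits
        subst hn2
        unfold bps_facts_w_rep
        rw [if_neg hn1, if_pos (Or.inl rfl), halt, bRec_succ,
          children_nil ps _ [] 1 0 (fun j h1 h2' => by
            have := h2 _ (getD_mem_of_lt ps j h2'); omega)]
      · by_cases hps0 : ps.length = 0
        · -- empty prime list
          unfold bps_facts_w_rep
          rw [if_neg hn1, if_pos (Or.inr hps0), halt, bRec_succ, List.length_eq_zero_iff.mp hps0]
          simp
        · -- the main case: n ≥ 2, ps a nonempty sorted list of integers ≥ 2, all ≤ n
          have hn2' : 2 ≤ n := by omega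
          have hq : ∀ p ∈ ps, p ≤ n := by
            intro p hp
            by_contra hgt
            exact hnd ⟨hn2', p, hp, by omega⟩
          have hN1 : 1 ≤ ps.length := by omega
          have hplast : (PySem.List.pyGet? ps (-1)).getD 0 = ps.getD (ps.length - 1) 0 := by
            rw [PySem.List.pyGet?_neg_one, List.getLast?_eq_getElem?,
              List.getElem?_eq_getElem (by omega), List.getD_eq_getElem ps 0 (by omega)]
            rfl
          set pl := ps.getD (ps.length - 1) 0 with hpl
          have hpl2 : 2 ≤ pl := h2 _ (getD_mem_of_lt ps _ (by omega))
          have hpln : pl ≤ n := hq _ (getD_mem_of_lt ps _ (by omega))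
          have hb := step_bounds hpl2 hpln
          set S0 : List (Int × Int × Int × Int) :=
            [(pl, (ps.length : Int) - 1, 1, PySem.Int.floordiv n pl)] with hS0
          have htn0 : ((ps.length : Int) - 1).toNat = ps.length - 1 := by omega
          have hWF0 : WF n ps S0 :=
            ⟨by omega, by rw [htn0]; omega, by rw [htn0], le_refl 1, hb.1, hpln, trivial⟩
          have hfact0 : aFact S0 = [(pl, 1)] := by rw [hS0]; simp [aFact]
          have hexp0 : bRec ps (n.toNat + 1) [] n 0 = [] :: expectedOf n ps S0 := by
            rw [bRec_succ]
            congr 1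
            have hsplit : ((List.range' 0 (ps.length - 0)).reverse).flatMap (bChild ps n.toNat [] n 0)
                = bChild ps n.toNat [] n 0 (ps.length - 1)
                  ++ ((List.range' 0 (ps.length - 1 - 0)).reverse).flatMap (bChild ps n.toNat [] n 0) := by
              rw [revRange_split 0 (ps.length - 0) (ps.length - 1) (by omega) (by omega),
                List.flatMap_append, List.flatMap_cons,
                (by omega : 0 + (ps.length - 0) - (ps.length - 1 + 1) = 0)]
              simp
            have hch : bChild ps n.toNat [] n 0 (ps.length - 1)
                = TF ps (aFact S0) (PySem.Int.floordiv n pl) (ps.length - 1) := by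
              unfold bChild
              rw [if_pos (by rw [← hpl]; exact hpln), if_neg (fun h => absurd h.1 (by simp)), hfact0]
              show bRec ps n.toNat ([] ++ [(pl, 1)]) _ _ = _
              rw [List.nil_append, ← hpl]
              unfold TF
              apply bRec_fuel_congr ps h2
              · omega
              · omega
            rw [hsplit, hch]
            have hexp : expectedOf n ps S0
                = TF ps (aFact S0) (PySem.Int.floordiv n pl) ((ps.length : Int) - 1).toNat
                  ++ (sibs ps (aFact []) (pRem n []) (pLo []) ((ps.length : Int) - 1).toNat
                      ++ pending n ps []) := rfl
            rw [hexp, htn0]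
            simp [sibs, pending, pRem, pLo, aFact]
          have hlen0 : (expectedOf n ps S0).length ≤ (n.toNat + 2) ^ (ps.length + 2) := by
            have h1 : (bRec ps (n.toNat + 1) [] n 0).length ≤ (n.toNat + 1) ^ (ps.length + 1 - 0) :=
              length_bRec_le ps h2 (n.toNat + 1) [] n 0
            rw [hexp0] at h1
            have h3 : (n.toNat + 1) ^ (ps.length + 1) ≤ (n.toNat + 2) ^ (ps.length + 2) :=
              le_trans (Nat.pow_le_pow_left (by omega) _) (Nat.pow_le_pow_right (by omega) (by omega))
            simp only [List.length_cons, Nat.sub_zero] at h1 ⊢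
            omega
          unfold bps_facts_w_rep
          rw [if_neg hn1, if_neg (by omega : ¬ (n = 1 ∨ ps.length = 0)), halt, hexp0]
          simp only [hplast]
          rw [loop_ok n ps hs h2 hq _ S0 hWF0 hlen0]


theorem bps_facts_w_rep_changed : Claim_changed_bps_facts_w_rep := by
  unfold Claim_changed_bps_facts_w_rep; decide

theorem bps_facts_w_rep_tight : Claim_exact_bps_facts_w_rep := by
  intro n ps _ hpre hD
  obtain ⟨hn2, p, hp, hnp⟩ := hD
  rcases hpre with hpre | hpre | ⟨hs, h2⟩
  · omega
  · subst hpre; simp at hp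
  · have hN1 : 1 ≤ ps.length := by
      cases ps with
      | nil => simp at hp
      | cons a l => simp
    have hle : ∀ {i j : Nat}, i ≤ j → j < ps.length → ps.getD i 0 ≤ ps.getD j 0 := by
      intro i j hij hj
      rcases Nat.eq_or_lt_of_le hij with he | hlt
      · rw [he]
      · exact le_of_lt (sorted_getD_lt ps hs hlt hj)
    set pl := ps.getD (ps.length - 1) 0 with hpl
    have hnpl : n < pl := by
      obtain ⟨i, hi, hip⟩ := List.mem_iff_getElem.mp hp
      have : p ≤ pl := by
        rw [← hip, ← List.getD_eq_getElem ps 0 hi]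
        exact hle (by omega) (by omega)
      omega
    have hn1 : ¬ n < 1 := by omega
    have hplast : (PySem.List.pyGet? ps (-1)).getD 0 = pl := by
      rw [PySem.List.pyGet?_neg_one, List.getLast?_eq_getElem?,
        List.getElem?_eq_getElem (by omega), hpl, List.getD_eq_getElem ps 0 (by omega)]
      rfl
    have hA : (bps_facts_w_rep n ps)[1]? = some [(pl, 1)] := by
      unfold bps_facts_w_rep
      rw [if_neg hn1, if_neg (by omega : ¬ (n = 1 ∨ ps.length = 0)), hplast]
      have hFpos : 0 < (n.toNat + 2) ^ (ps.length + 2) := Nat.pow_pos (by omega)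
      obtain ⟨f', hf'⟩ : ∃ f', (n.toNat + 2) ^ (ps.length + 2) = f' + 1 :=
        ⟨(n.toNat + 2) ^ (ps.length + 2) - 1, by omega⟩
      rw [hf']
      show (([] : List (Int × Int))
          :: aLoop n ps (f' + 1) [(pl, (ps.length : Int) - 1, 1, PySem.Int.floordiv n pl)])[1]?
        = some [(pl, 1)]
      rw [List.getElem?_cons_succ]
      rw [show (aLoop n ps (f' + 1) [(pl, (ps.length : Int) - 1, 1, PySem.Int.floordiv n pl)])[0]?
          = (aLoop n ps (f' + 1) [(pl, (ps.length : Int) - 1, 1, PySem.Int.floordiv n pl)]).head?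
        from List.head?_eq_getElem?.symm, aLoop_head]
      simp [aFact]
    intro heq
    have hB := hA
    rw [heq] at hB
    unfold bps_facts_w_rep_alt at hB
    rw [if_neg hn1, bRec_succ] at hB
    have hmem : [(pl, 1)] ∈ ((List.range' 0 (ps.length - 0)).reverse).flatMap (bChild ps n.toNat [] n 0) := by
      have := List.getElem?_eq_some_iff.mp (by simpa using hB)
      obtain ⟨h, hx⟩ := this
      rw [← hx]
      exact List.getElem_mem h
    obtain ⟨j, _, hxj⟩ := List.mem_flatMap.mp hmem
    unfold bChild at hxj
    by_cases hfe : ps.getD j 0 ≤ n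
    · rw [if_pos hfe, if_neg (fun h => absurd h.1 (by simp)), List.nil_append] at hxj
      obtain ⟨e, t, hx⟩ := bRec_head_fst ps n.toNat (ps.getD j 0) 1 []
        (PySem.Int.floordiv n (ps.getD j 0)) j (fun _ => rfl) _ hxj
      have hplj : pl = ps.getD j 0 := by
        injection hx with h1 h2
        injection h1 with h3 h4
      omega
    · rw [if_neg hfe] at hxj
      simp at hxj
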